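-- pv_equiv track=rewrite | github.com/FELT0416/PS_Backup | 프로그래머스/1/250137. ［PCCP 기출문제］ 1번 ／ 붕대 감기/［PCCP 기출문제］ 1번 ／ 붕대 감기.py | solution
-- ===== SOURCE A (Python) =====
-- def solution(bandage, health, attacks):
--     answer = 0
--
--     curH=health
--     prev=0
--     for time, damage in attacks:
--         curH+=((time-prev-1)//bandage[0])*bandage[2]+(time-prev-1)*bandage[1]
--         if curH>health:
--             curH=health
--         curH-=damage
--
--         if curH<=0:
--             answer=-1
--             break
--         else:
--             answer= curH
--         prev = time
--
--     return answer
-- ===== SOURCE B (Python) =====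
-- def solution(bandage, health, attacks):
--     if not attacks:
--         return 0
--     t, x, y = bandage[0], bandage[1], bandage[2]
--     # Scan reformulation: instead of simulating capped health, track S = net
--     # uncapped health change and M = the largest uncapped peak so far (what the
--     # cap cuts off); current health is always health + S - M, by the identity
--     # min(health, h + heal) - d = health + (S + heal - d) - max(M, S + heal).
--     S = 0
--     M = 0
--     prev = 0
--     for time, damage in attacks:
--         gap = time - prev - 1
--         heal = (gap // t) * y + gap * x
--         M = max(M, S + heal)
--         S += heal - damage
--         if health + S - M <= 0:
--             return -1
--         prev = time
--     return health + S - M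
-- ===== Notes on version B (the rewrite author's own statement) =====
-- stated objective: alternative
-- what changed: B drops A's capped-health simulation (curH with an if-cap and answer/break bookkeeping) and instead scans with a prefix sum S of uncapped heal-damage and a running maximum M of the uncapped peaks, recovering the health as health + S - M via the identity min(health, h+heal) - d = health + S' - max(M, S+heal).
import Mathlib
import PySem

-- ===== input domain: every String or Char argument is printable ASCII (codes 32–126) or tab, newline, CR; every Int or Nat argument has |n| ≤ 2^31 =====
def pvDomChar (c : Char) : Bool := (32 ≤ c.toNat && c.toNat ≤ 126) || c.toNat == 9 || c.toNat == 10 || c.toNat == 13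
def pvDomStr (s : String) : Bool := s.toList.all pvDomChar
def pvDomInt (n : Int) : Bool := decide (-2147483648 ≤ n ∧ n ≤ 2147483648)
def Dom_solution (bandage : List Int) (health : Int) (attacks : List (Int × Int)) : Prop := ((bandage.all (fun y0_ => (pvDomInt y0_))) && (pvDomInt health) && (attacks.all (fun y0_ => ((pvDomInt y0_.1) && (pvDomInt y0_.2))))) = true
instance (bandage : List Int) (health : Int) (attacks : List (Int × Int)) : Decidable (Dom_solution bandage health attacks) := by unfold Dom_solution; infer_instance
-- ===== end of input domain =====

-- B replaces A's capped-health simulation by a prefix-sum + running-max scan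
-- (health is recovered as health + S - M); an alternative of the same O(n) cost.


-- ===== PORT A =====
-- A's loop over attacks with state (curH, prev, answer) and an early break.
-- bandage[i] is ported as List.getD (exact under Pre_solution: 3 ≤ bandage.length);
-- '//' is PySem.Int.floordiv (exact under Pre_solution: bandage[0] ≠ 0).
def solutionGo (bandage : List Int) (health : Int) :
    List (Int × Int) → Int → Int → Int → Int
  | [], _, _, answer => answer
  | (time, damage) :: rest, curH, prev, answer =>
      let c1 := curH + (PySem.Int.floordiv (time - prev - 1) (bandage.getD 0 0)) * bandage.getD 2 0
                  + (time - prev - 1) * bandage.getD 1 0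
      let c2 := if c1 > health then health else c1
      let c3 := c2 - damage
      if c3 ≤ 0 then -1
      else solutionGo bandage health rest c3 time c3

def solution (bandage : List Int) (health : Int) (attacks : List (Int × Int)) : Int :=
  solutionGo bandage health attacks health 0 0

-- ===== PORT B =====
-- B's scan: S = net uncapped heal-damage sum, M = largest uncapped peak so far.
def altGo (t x y health : Int) : List (Int × Int) → Int → Int → Int → Int
  | [], S, M, _ => health + S - M
  | (time, damage) :: rest, S, M, prev =>
      let gap := time - prev - 1
      let heal := (PySem.Int.floordiv gap t) * y + gap * x
      let M' := max M (S + heal)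
      let S' := S + heal - damage
      if health + S' - M' ≤ 0 then -1
      else altGo t x y health rest S' M' time

def solution_alt (bandage : List Int) (health : Int) (attacks : List (Int × Int)) : Int :=
  if attacks = [] then 0
  else altGo (bandage.getD 0 0) (bandage.getD 1 0) (bandage.getD 2 0) health attacks 0 0 0

-- ===== PRECONDITION & SPEC =====
-- Pre_ excludes exactly the inputs where Python A raises: with a nonempty attack list
-- A indexes bandage[0..2] (IndexError if len < 3) and divides by bandage[0] (ZeroDivisionError if 0).
def Pre_solution (bandage : List Int) (health : Int) (attacks : List (Int × Int)) : Prop :=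
  attacks = [] ∨ (3 ≤ bandage.length ∧ bandage.getD 0 0 ≠ 0)
instance (bandage : List Int) (health : Int) (attacks : List (Int × Int)) : Decidable (Pre_solution bandage health attacks) := by unfold Pre_solution; infer_instance
def pvWitness_solution : List Int × Int × (List (Int × Int)) := ([3, 2, 7], 20, [(1, 15), (5, 16), (8, 6)])

def Spec_solution (bandage : List Int) (health : Int) (attacks : List (Int × Int)) (out : Int) : Prop := out = solution_alt bandage health attacks
instance (bandage : List Int) (health : Int) (attacks : List (Int × Int)) (out : Int) : Decidable (Spec_solution bandage health attacks out) := by unfold Spec_solution; infer_instance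

-- ===== CLAIM (what is proved, stated in full; the proofs are below) =====
def Claim_equal_solution : Prop := ∀ (bandage : List Int) (health : Int) (attacks : List (Int × Int)), Dom_solution bandage health attacks → Pre_solution bandage health attacks → Spec_solution bandage health attacks (solution bandage health attacks)

-- ===== LEMMAS AND PROOFS =====

-- Invariant: with curH = answer = health + S - M, A's loop computes B's scan.
theorem go_eq (bandage : List Int) (health : Int) :
    ∀ (rest : List (Int × Int)) (S M prev : Int),
      solutionGo bandage health rest (health + S - M) prev (health + S - M) =
        altGo (bandage.getD 0 0) (bandage.getD 1 0) (bandage.getD 2 0) health rest S M prev := by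
  intro rest
  induction rest with
  | nil => intro S M prev; simp [solutionGo, altGo]
  | cons p rest ih =>
      intro S M prev
      obtain ⟨time, damage⟩ := p
      simp only [solutionGo, altGo]
      set heal := (PySem.Int.floordiv (time - prev - 1) (bandage.getD 0 0)) * bandage.getD 2 0
                    + (time - prev - 1) * bandage.getD 1 0 with hheal
      have hstep :
          (if health + S - M + heal > health then health else health + S - M + heal) - damage
            = health + (S + heal - damage) - max M (S + heal) := by
        rw [Int.max_def]; split_ifs <;> omega
      have harr : health + S - M
            + PySem.Int.floordiv (time - prev - 1) (bandage.getD 0 0) * bandage.getD 2 0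
            + (time - prev - 1) * bandage.getD 1 0 = health + S - M + heal := by
        rw [hheal]; ring
      rw [harr, hstep]
      by_cases hd : health + (S + heal - damage) - max M (S + heal) ≤ 0
      · rw [if_pos hd, if_pos hd]
      · rw [if_neg hd, if_neg hd, ← ih]

-- ===== VERDICT (by name: the statement is the Claim_ definition above) =====
theorem solution_spec : Claim_equal_solution := by
  intro bandage health attacks _ _
  unfold Spec_solution solution solution_alt
  cases attacks with
  | nil => simp [solutionGo]
  | cons p rest =>
      obtain ⟨time, damage⟩ := p
      simp only [solutionGo, altGo, reduceCtorEq, if_false]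
      set heal := (PySem.Int.floordiv (time - 0 - 1) (bandage.getD 0 0)) * bandage.getD 2 0
                    + (time - 0 - 1) * bandage.getD 1 0 with hheal
      have hstep :
          (if health + heal > health then health else health + heal) - damage
            = health + (0 + heal - damage) - max 0 (0 + heal) := by
        rw [Int.max_def]; split_ifs <;> omega
      have harr : health
            + PySem.Int.floordiv (time - 0 - 1) (bandage.getD 0 0) * bandage.getD 2 0
            + (time - 0 - 1) * bandage.getD 1 0 = health + heal := by
        rw [hheal]; ring
      rw [harr, hstep]
      by_cases hd : health + (0 + heal - damage) - max 0 (0 + heal) ≤ 0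
      · rw [if_pos hd, if_pos hd]
      · rw [if_neg hd, if_neg hd, ← go_eq]
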